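-- pv_equiv track=rewrite | github.com/bili256355/easm_project01 | stage_partition/V10/v10.5/src/field_index_validation_v10_5_a.py | day_index_to_month_day
-- ===== SOURCE A (Python) =====
-- def day_index_to_month_day(day_index: int) -> str:
--     mdays = [(4, 30), (5, 31), (6, 30), (7, 31), (8, 31), (9, 30)]
--     d = int(day_index)
--     for month, nday in mdays:
--         if d < nday:
--             return f"{month:02d}-{d + 1:02d}"
--         d -= nday
--     return f"overflow+{d}"
-- ===== SOURCE B (Python) =====
-- _ENDS = [30, 61, 91, 122, 153, 183]
--
-- def _bisect_right(a, x):
--     lo, hi = 0, len(a)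
--     while lo < hi:
--         mid = (lo + hi) // 2
--         if x < a[mid]:
--             hi = mid
--         else:
--             lo = mid + 1
--     return lo
--
-- def day_index_to_month_day(day_index: int) -> str:
--     d = int(day_index)
--     i = _bisect_right(_ENDS, d)
--     if i == 6:
--         return f"overflow+{d - 183}"
--     start = _ENDS[i - 1] if i > 0 else 0
--     return f"{4 + i:02d}-{d - start + 1:02d}"
-- ===== Notes on version B (the rewrite author's own statement) =====
-- stated objective: alternative
-- what changed: Replaces the linear subtract-and-check scan over per-month lengths with a precomputed cumulative-boundary table queried by binary search (bisect_right), deriving month and day-in-month arithmetically from the found index.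
import Mathlib
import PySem

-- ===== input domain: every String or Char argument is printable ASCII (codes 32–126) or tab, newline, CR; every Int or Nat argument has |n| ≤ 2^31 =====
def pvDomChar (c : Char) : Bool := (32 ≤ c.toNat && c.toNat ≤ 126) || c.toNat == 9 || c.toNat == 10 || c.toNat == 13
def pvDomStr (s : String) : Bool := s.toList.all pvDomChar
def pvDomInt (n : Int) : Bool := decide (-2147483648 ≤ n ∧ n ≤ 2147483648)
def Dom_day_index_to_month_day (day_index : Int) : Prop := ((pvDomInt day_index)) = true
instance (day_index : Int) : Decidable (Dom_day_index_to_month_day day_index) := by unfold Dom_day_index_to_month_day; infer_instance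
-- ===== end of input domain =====

-- B replaces A's linear subtract-and-check scan with a cumulative-boundary table queried by
-- hand-written binary search (objective: alternative algorithm; same cost at this fixed size).

-- Python f"{n:02d}" at width 2: a nonnegative single digit gets one leading zero, everything else
-- is str(n) unchanged (negative values already occupy ≥ 2 characters). Exact for all ints.
def pyFmt02 (n : Int) : String :=
  if 0 ≤ n ∧ n < 10 then "0" ++ PySem.Int.toStr n else PySem.Int.toStr n

-- ===== PORT A =====
-- the for-loop with early return, as structural recursion over the month list
def dayIdxLoopA : List (Int × Int) → Int → String
  | [], d => "overflow+" ++ PySem.Int.toStr d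
  | (month, nday) :: rest, d =>
      if d < nday then pyFmt02 month ++ "-" ++ pyFmt02 (d + 1)
      else dayIdxLoopA rest (d - nday)

def day_index_to_month_day (day_index : Int) : String :=
  dayIdxLoopA [(4, 30), (5, 31), (6, 30), (7, 31), (8, 31), (9, 30)] day_index

-- ===== PORT B =====
-- the while-loop of _bisect_right (lo, hi are list indices, hence Nat)
def bisectLoop (a : List Int) (x : Int) (lo hi : Nat) : Nat :=
  if _h : lo < hi then
    let mid := (lo + hi) / 2
    if x < a.getD mid 0 then bisectLoop a x lo mid
    else bisectLoop a x (mid + 1) hi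
  else lo
termination_by hi - lo
decreasing_by all_goals omega

def pvEnds : List Int := [30, 61, 91, 122, 153, 183]

def day_index_to_month_day_alt (day_index : Int) : String :=
  let d := day_index
  let i := bisectLoop pvEnds d 0 pvEnds.length
  if i == 6 then "overflow+" ++ PySem.Int.toStr (d - 183)
  else
    let start := if i > 0 then pvEnds.getD (i - 1) 0 else 0
    pyFmt02 (4 + (i : Int)) ++ "-" ++ pyFmt02 (d - start + 1)

-- ===== PRECONDITION & SPEC =====
def Spec_day_index_to_month_day (day_index : Int) (out : String) : Prop := out = day_index_to_month_day_alt day_index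
instance (day_index : Int) (out : String) : Decidable (Spec_day_index_to_month_day day_index out) := by unfold Spec_day_index_to_month_day; infer_instance

-- ===== CLAIM (what is proved, stated in full; the proofs are below) =====
def Claim_equal_day_index_to_month_day : Prop := ∀ (day_index : Int), Dom_day_index_to_month_day day_index → Spec_day_index_to_month_day day_index (day_index_to_month_day day_index)

-- ===== LEMMAS AND PROOFS =====

-- the binary search on the fixed 6-boundary table, written out as a decision tree
lemma bisect_ends (d : Int) :
    bisectLoop pvEnds d 0 6 =
      if d < 122 then (if d < 61 then (if d < 30 then 0 else 1) else (if d < 91 then 2 else 3))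
      else (if d < 153 then 4 else (if d < 183 then 5 else 6)) := by
  rw [bisectLoop]; norm_num [pvEnds]
  split_ifs with h1 <;>
    (rw [bisectLoop]; norm_num) <;>
    split_ifs <;>
    (rw [bisectLoop]; norm_num) <;>
    (try split_ifs) <;>
    (try rw [bisectLoop]) <;> norm_num <;> omega

-- ===== VERDICT (by name: the statement is the Claim_ definition above) =====
theorem day_index_to_month_day_spec : Claim_equal_day_index_to_month_day := by
  intro d _
  show day_index_to_month_day d = day_index_to_month_day_alt d
  unfold day_index_to_month_day day_index_to_month_day_alt
  dsimp only
  rw [show pvEnds.length = 6 from rfl, bisect_ends]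
  by_cases h30 : d < 30 <;> by_cases h61 : d < 61 <;> by_cases h91 : d < 91 <;>
    by_cases h122 : d < 122 <;> by_cases h153 : d < 153 <;> by_cases h183 : d < 183 <;>
    simp [dayIdxLoopA, pvEnds, h30, h61, h91, h122, h153, h183] <;>
    first
      | rfl | omega
      | (split_ifs <;>
          first
            | rfl | omega
            | (congr 2 <;> first | rfl | omega))
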